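-- pv_equiv track=rewrite | github.com/NileyGF/Information-Retrieval | Boolean_model.py | check_punct
-- ===== SOURCE A (Python) =====
-- def check_punct(text):
--     result = ''
--     i=0
--     while i < len(text) and i>=0:
--         if i == len(text) - 1:
--             if text[i] == '!' or text[i] == '&' or text[i] == '|':
--                 result += ' '
--             else:result += text[i]
--         else:
--             if text[i] == '!':
--                 if not text[i+1] == '!':
--                     result += ' '
--                 else:
--                     result += '!!'
--                     i+=1
--             elif text[i] == '&':
--                 if not text[i+1] == '&':
--                     result += ' '
--                 else:
--                     result += '&&'
--                     i+=1
--             elif text[i] == '|':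
--                 if not text[i+1] == '|':
--                     result += ' '
--                 else:
--                     result += '||'
--                     i+=1
--             else:
--                 result += text[i]
--         i+=1
--     return result
-- ===== SOURCE B (Python) =====
-- import re
--
-- _OP = re.compile(r'!!|&&|\|\||[!&|]')
--
-- def check_punct(text):
--     # doubled operators stay verbatim; a lone operator becomes a single space
--     return _OP.sub(lambda m: m.group(0) if len(m.group(0)) == 2 else ' ', text)
-- ===== Notes on version B (the rewrite author's own statement) =====
-- stated objective: idiomatic
-- what changed: Replaced the index-stepping while-loop state machine with a single regex substitution whose alternation tries a doubled operator first (kept verbatim) and otherwise a lone operator (replaced by one space).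
import Mathlib
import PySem

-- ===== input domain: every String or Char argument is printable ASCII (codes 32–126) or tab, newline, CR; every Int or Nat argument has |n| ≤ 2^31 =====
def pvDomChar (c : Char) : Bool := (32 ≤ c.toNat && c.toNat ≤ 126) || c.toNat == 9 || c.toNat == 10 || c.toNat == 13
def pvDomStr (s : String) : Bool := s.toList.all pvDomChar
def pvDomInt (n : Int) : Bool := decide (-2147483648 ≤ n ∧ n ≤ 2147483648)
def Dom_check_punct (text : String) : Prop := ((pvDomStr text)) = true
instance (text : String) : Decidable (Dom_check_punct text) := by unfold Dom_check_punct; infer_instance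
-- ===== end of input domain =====

set_option maxRecDepth 4000


-- B replaces A's index-stepping while-loop state machine by one regex substitution
-- (re.sub over the alternation '!!|&&|\|\||[!&|]'); objective: idiomatic, same cost.

-- ===== PORT A =====
-- A's while-loop: index i only ever increases from 0, so Python's 'i >= 0'
-- condition is always true; the loop is the structural recursion on i below.
def checkPunctLoop (t : List Char) (i : Nat) (res : List Char) : List Char :=
  if _h : i < t.length then
    let c := t.getD i ' '
    if i = t.length - 1 then
      if c = '!' ∨ c = '&' ∨ c = '|' then
        checkPunctLoop t (i + 1) (res ++ [' '])
      else
        checkPunctLoop t (i + 1) (res ++ [c])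
    else
      if c = '!' then
        if ¬ (t.getD (i + 1) ' ' = '!') then checkPunctLoop t (i + 1) (res ++ [' '])
        else checkPunctLoop t (i + 2) (res ++ ['!', '!'])
      else if c = '&' then
        if ¬ (t.getD (i + 1) ' ' = '&') then checkPunctLoop t (i + 1) (res ++ [' '])
        else checkPunctLoop t (i + 2) (res ++ ['&', '&'])
      else if c = '|' then
        if ¬ (t.getD (i + 1) ' ' = '|') then checkPunctLoop t (i + 1) (res ++ [' '])
        else checkPunctLoop t (i + 2) (res ++ ['|', '|'])
      else
        checkPunctLoop t (i + 1) (res ++ [c])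
  else res
termination_by t.length - i

def check_punct (text : String) : String :=
  String.ofList (checkPunctLoop text.toList 0 [])

-- ===== PORT B =====
-- Transcription of re.sub with pattern '!!|&&|\|\||[!&|]': at each position the
-- engine tries the alternatives in order (doubled operator first, then a lone
-- one), emits the replacement, and resumes after the match; exact for this
-- pattern since no alternative can match starting inside a skipped character.
def reSubOps : List Char → List Char
  | [] => []
  | [a] => if a = '!' ∨ a = '&' ∨ a = '|' then [' '] else [a]
  | a :: b :: rest =>
    if (a = '!' ∧ b = '!') ∨ (a = '&' ∧ b = '&') ∨ (a = '|' ∧ b = '|') then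
      a :: b :: reSubOps rest
    else if a = '!' ∨ a = '&' ∨ a = '|' then
      ' ' :: reSubOps (b :: rest)
    else
      a :: reSubOps (b :: rest)

def check_punct_alt (text : String) : String :=
  String.ofList (reSubOps text.toList)

-- ===== PRECONDITION & SPEC =====
def Spec_check_punct (text : String) (out : String) : Prop := out = check_punct_alt text
instance (text : String) (out : String) : Decidable (Spec_check_punct text out) := by unfold Spec_check_punct; infer_instance

-- ===== CLAIM (what is proved, stated in full; the proofs are below) =====
def Claim_equal_check_punct : Prop := ∀ (text : String), Dom_check_punct text → Spec_check_punct text (check_punct text)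

-- ===== LEMMAS AND PROOFS =====

theorem reSubOps_nil : reSubOps [] = [] := rfl

theorem reSubOps_one (a : Char) :
    reSubOps [a] = if a = '!' ∨ a = '&' ∨ a = '|' then [' '] else [a] := rfl

theorem reSubOps_cons₂ (a b : Char) (r : List Char) :
    reSubOps (a :: b :: r) =
      if (a = '!' ∧ b = '!') ∨ (a = '&' ∧ b = '&') ∨ (a = '|' ∧ b = '|') then
        a :: b :: reSubOps r
      else if a = '!' ∨ a = '&' ∨ a = '|' then ' ' :: reSubOps (b :: r)
      else a :: reSubOps (b :: r) := rfl

theorem checkPunctLoop_eq (n : Nat) :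
    ∀ (t : List Char) (i : Nat) (res : List Char), t.length - i = n →
      checkPunctLoop t i res = res ++ reSubOps (t.drop i) := by
  induction n using Nat.strong_induction_on with
  | _ n ih =>
    intro t i res hn
    rw [checkPunctLoop]
    by_cases hi : i < t.length
    · simp only [hi, dif_pos]
      have hdrop : t.drop i = t[i] :: t.drop (i + 1) := List.drop_eq_getElem_cons hi
      have hget : t.getD i ' ' = t[i] := List.getD_eq_getElem t ' ' hi
      by_cases hlast : i = t.length - 1
      · have h1 : t.drop (i + 1) = [] := by
          apply List.drop_eq_nil_of_le; omega
        have hrec : ∀ r : List Char, checkPunctLoop t (i + 1) r = r := by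
          intro r; rw [checkPunctLoop, dif_neg (by omega)]
        rw [if_pos hlast]
        rw [hdrop, h1, reSubOps_one]
        by_cases hc : t[i] = '!' ∨ t[i] = '&' ∨ t[i] = '|'
        · rw [hget, if_pos hc, if_pos hc, hrec]
        · rw [hget, if_neg hc, if_neg hc, hrec]
      · have hi1 : i + 1 < t.length := by omega
        have hdrop1 : t.drop (i + 1) = t[i + 1] :: t.drop (i + 2) :=
          List.drop_eq_getElem_cons hi1
        have hget1 : t.getD (i + 1) ' ' = t[i + 1] := List.getD_eq_getElem t ' ' hi1
        have ih1 : ∀ r, checkPunctLoop t (i + 1) r = r ++ reSubOps (t.drop (i + 1)) := by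
          intro r; exact ih (t.length - (i + 1)) (by omega) t (i + 1) r rfl
        have ih2 : ∀ r, checkPunctLoop t (i + 2) r = r ++ reSubOps (t.drop (i + 2)) := by
          intro r; exact ih (t.length - (i + 2)) (by omega) t (i + 2) r rfl
        rw [hdrop, hdrop1, reSubOps_cons₂]
        simp only [if_neg hlast, hget, hget1]
        by_cases hb : t[i] = '!'
        · by_cases hnx : t[i + 1] = '!'
          · simp [hb, hnx, ih2]
          · rw [if_pos hb, if_pos hnx, ih1, hdrop1,
              if_neg (by simp [hb, hnx]), if_pos (Or.inl hb)]
            simp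
        · by_cases hb2 : t[i] = '&'
          · by_cases hnx : t[i + 1] = '&'
            · simp [hb2, hnx, ih2]
            · rw [if_neg hb, if_pos hb2, if_pos hnx, ih1, hdrop1,
                if_neg (by simp [hb2, hnx]), if_pos (Or.inr (Or.inl hb2))]
              simp
          · by_cases hb3 : t[i] = '|'
            · by_cases hnx : t[i + 1] = '|'
              · simp [hb3, hnx, ih2]
              · rw [if_neg hb, if_neg hb2, if_pos hb3, if_pos hnx, ih1, hdrop1,
                  if_neg (by simp [hb3, hnx]), if_pos (Or.inr (Or.inr hb3))]
                simp
            · rw [if_neg hb, if_neg hb2, if_neg hb3, ih1, hdrop1,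
                if_neg (by simp [hb, hb2, hb3]), if_neg (by simp [hb, hb2, hb3])]
              simp
    · simp only [hi, dif_neg, not_false_iff]
      have hnil : t.drop i = [] := List.drop_eq_nil_of_le (by omega)
      rw [hnil, reSubOps_nil, List.append_nil]

-- ===== VERDICT (by name: the statement is the Claim_ definition above) =====
theorem check_punct_spec : Claim_equal_check_punct := by
  intro text _
  unfold Spec_check_punct check_punct check_punct_alt
  rw [checkPunctLoop_eq (text.toList.length - 0) text.toList 0 [] rfl]
  simp
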